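-- pv_equiv track=rewrite | github.com/jonathonreilly/toy-physics | scripts/frontier_s3_boundary_link_theorem.py | compute_meet
-- ===== SOURCE A (Python) =====
-- def compute_fi(vi: int, si: int) -> int:
--     """
--     Per-coordinate penalty: f_i(s_i) = max((v_i + s_i)^2, (v_i + s_i + 1)^2).
--     """
--     a = (vi + si) ** 2
--     b = (vi + si + 1) ** 2
--     return max(a, b)
--
-- def preferred_sign(vi: int) -> tuple:
--     """
--     Return (sigma_star, is_indifferent) where sigma_star is the preferred
--     sign value for coordinate with vertex value v_i.
--     """
--     f0 = compute_fi(vi, 0)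
--     fm1 = compute_fi(vi, -1)
--     if f0 < fm1:
--         return (0, False)
--     elif fm1 < f0:
--         return (-1, False)
--     else:
--         return (0, True)  # indifferent; either value works
--
-- def compute_meet(v: tuple, s: tuple, t: tuple) -> tuple:
--     """
--     Compute the meet of s and t: for each coordinate, choose the
--     preferred value if at least one of s_i, t_i is preferred.
--     """
--     m = []
--     for i in range(3):
--         pref, indiff = preferred_sign(v[i])
--         if indiff:
--             m.append(s[i])  # both equivalent
--         else:
--             # preferred sign is pref; use it if either s_i or t_i is pref
--             if s[i] == pref or t[i] == pref:
--                 m.append(pref)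
--             else:
--                 # both avoid preferred => both must be the other value
--                 m.append(s[i])
--     return tuple(m)
-- ===== SOURCE B (Python) =====
-- def compute_meet(v: tuple, s: tuple, t: tuple) -> tuple:
--     # Start from s and overwrite a coordinate with t's value exactly when t
--     # carries the strictly preferred sign there (-1 when v_i > 0, 0 when v_i < 0).
--     # Correct because whenever s_i itself is the preferred value, returning s_i
--     # is already the preferred value, so only t needs inspecting.
--     return tuple(ti if (vi > 0 and ti == -1) or (vi < 0 and ti == 0) else si
--                  for vi, si, ti in zip(v, s, t))
-- ===== Notes on version B (the rewrite author's own statement) =====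
-- stated objective: simpler
-- what changed: B drops compute_fi/preferred_sign, the index loop and the 's_i==pref or t_i==pref' case analysis entirely: it takes s as the baseline and, in one zip pass, overwrites a coordinate with t's value exactly when t holds the strictly preferred sign (-1 for v_i>0, 0 for v_i<0), which is equivalent because when s_i is itself preferred, returning s_i already yields the preferred value.
import Mathlib
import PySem

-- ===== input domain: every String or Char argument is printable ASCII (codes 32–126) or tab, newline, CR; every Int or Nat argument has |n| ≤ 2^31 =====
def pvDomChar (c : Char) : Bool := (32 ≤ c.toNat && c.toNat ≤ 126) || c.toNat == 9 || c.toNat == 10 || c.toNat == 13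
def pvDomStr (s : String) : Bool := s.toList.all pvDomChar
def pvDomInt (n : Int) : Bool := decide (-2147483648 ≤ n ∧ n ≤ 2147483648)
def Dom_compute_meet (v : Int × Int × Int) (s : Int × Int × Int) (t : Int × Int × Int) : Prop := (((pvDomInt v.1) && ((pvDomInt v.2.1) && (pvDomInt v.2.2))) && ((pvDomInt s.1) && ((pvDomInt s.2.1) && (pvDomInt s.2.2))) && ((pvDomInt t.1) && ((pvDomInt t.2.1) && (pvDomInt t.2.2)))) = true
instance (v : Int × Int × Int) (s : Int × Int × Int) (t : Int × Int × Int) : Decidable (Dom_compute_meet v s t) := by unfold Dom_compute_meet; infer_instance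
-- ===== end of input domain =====

-- B drops the squared-penalty helpers and the s/t disjunction: it starts from s and overwrites a coordinate with t's value exactly when t holds the strictly preferred sign (simpler).


-- ===== PORT A =====
def compute_fi (vi : Int) (si : Int) : Int :=
  let a := (vi + si) ^ 2
  let b := (vi + si + 1) ^ 2
  max a b

def preferred_sign (vi : Int) : Int × Bool :=
  let f0 := compute_fi vi 0
  let fm1 := compute_fi vi (-1)
  if f0 < fm1 then (0, false)
  else if fm1 < f0 then (-1, false)
  else (0, true)

-- index i of a Python 3-tuple, as A's v[i]/s[i]/t[i] (i ∈ range(3))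
def pvTripleGet (p : Int × Int × Int) (i : Nat) : Int :=
  if i = 0 then p.1 else if i = 1 then p.2.1 else p.2.2

def compute_meet (v : Int × Int × Int) (s : Int × Int × Int) (t : Int × Int × Int) : Int × Int × Int :=
  -- the loop 'for i in range(3): … m.append(…)' as a fold over range 3
  let m := (List.range 3).foldl (fun m i =>
    if (preferred_sign (pvTripleGet v i)).2 then m ++ [pvTripleGet s i]
    else if pvTripleGet s i = (preferred_sign (pvTripleGet v i)).1 ∨ pvTripleGet t i = (preferred_sign (pvTripleGet v i)).1 then m ++ [(preferred_sign (pvTripleGet v i)).1]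
    else m ++ [pvTripleGet s i]) []
  -- tuple(m): m has length 3 by construction
  match m with
  | [a, b, c] => (a, b, c)
  | _ => (0, 0, 0)

-- ===== PORT B =====
def compute_meet_alt (v : Int × Int × Int) (s : Int × Int × Int) (t : Int × Int × Int) : Int × Int × Int :=
  -- Source B's single zip pass: the generator over zip(v, s, t), then tuple(...)
  let m := (List.zip [v.1, v.2.1, v.2.2] (List.zip [s.1, s.2.1, s.2.2] [t.1, t.2.1, t.2.2])).map
    (fun x =>
      let vi := x.1; let si := x.2.1; let ti := x.2.2
      if (vi > 0 ∧ ti = -1) ∨ (vi < 0 ∧ ti = 0) then ti else si)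
  -- tuple(...) of the length-3 generator
  (m[0]!, m[1]!, m[2]!)

-- ===== PRECONDITION & SPEC =====
def Spec_compute_meet (v : Int × Int × Int) (s : Int × Int × Int) (t : Int × Int × Int) (out : Int × Int × Int) : Prop := out = compute_meet_alt v s t
instance (v : Int × Int × Int) (s : Int × Int × Int) (t : Int × Int × Int) (out : Int × Int × Int) : Decidable (Spec_compute_meet v s t out) := by unfold Spec_compute_meet; infer_instance

-- ===== CLAIM (what is proved, stated in full; the proofs are below) =====
def Claim_equal_compute_meet : Prop := ∀ (v : Int × Int × Int) (s : Int × Int × Int) (t : Int × Int × Int), Dom_compute_meet v s t → Spec_compute_meet v s t (compute_meet v s t)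

-- ===== LEMMAS AND PROOFS =====

-- closed form of A's preferred_sign
theorem preferred_sign_eq (vi : Int) :
    preferred_sign vi = if vi = 0 then (0, true) else if vi > 0 then (-1, false) else (0, false) := by
  unfold preferred_sign compute_fi
  rcases lt_trichotomy vi 0 with h | h | h
  · have hlt : max ((vi + 0) ^ 2) ((vi + 0 + 1) ^ 2) < max ((vi + -1) ^ 2) ((vi + -1 + 1) ^ 2) := by
      apply max_lt <;> nlinarith [le_max_left ((vi + -1) ^ 2) ((vi + -1 + 1) ^ 2)]
    simp only [if_pos hlt]
    simp [h.ne, not_lt.mpr h.le]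
  · subst h; decide
  · have hlt : max ((vi + -1) ^ 2) ((vi + -1 + 1) ^ 2) < max ((vi + 0) ^ 2) ((vi + 0 + 1) ^ 2) := by
      apply max_lt <;> nlinarith [le_max_right ((vi + 0) ^ 2) ((vi + 0 + 1) ^ 2)]
    rw [if_neg (not_lt.mpr hlt.le), if_pos hlt]
    simp [h.ne', h]

-- one loop-body step of A equals appending B's per-coordinate value
theorem step_eq (m : List Int) (vi si ti : Int) :
    (if (preferred_sign vi).2 then m ++ [si]
     else if si = (preferred_sign vi).1 ∨ ti = (preferred_sign vi).1 then m ++ [(preferred_sign vi).1]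
     else m ++ [si]) =
    m ++ [if (vi > 0 ∧ ti = -1) ∨ (vi < 0 ∧ ti = 0) then ti else si] := by
  rw [preferred_sign_eq]
  by_cases h0 : vi = 0
  · simp [h0]
  · by_cases hp : vi > 0
    · simp only [if_neg h0, if_pos hp]
      by_cases ht : ti = -1
      · simp [ht, hp]
      · by_cases hs : si = -1 <;> simp [hs, ht, hp, not_lt.mpr hp.le]
    · have hn : vi < 0 := by omega
      simp only [if_neg h0, if_neg hp]
      by_cases ht : ti = 0
      · simp [ht, hn, hp]
      · by_cases hs : si = 0 <;> simp [hs, ht, hp, hn]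

-- ===== VERDICT (by name: the statement is the Claim_ definition above) =====
theorem compute_meet_spec : Claim_equal_compute_meet := by
  intro v s t _
  show compute_meet v s t = compute_meet_alt v s t
  unfold compute_meet compute_meet_alt
  have h3 : List.range 3 = [0, 1, 2] := rfl
  rw [h3]
  simp only [List.foldl, List.zip, List.zipWith, List.map]
  rw [step_eq, step_eq, step_eq]
  simp [pvTripleGet]
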